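-- pv_equiv track=rewrite | github.com/skywraither/python_homework | task2/work1.py | min_flips_to_same_side
-- ===== SOURCE A (Python) =====
-- def min_flips_to_same_side(coins):
--     if not coins:
--         return 0
--
--     flips = 0
--     current_side = coins[0]
--
--     for coin in coins:
--         if coin != current_side:
--             flips += 1
--             current_side = coin
--
--     return flips
-- ===== SOURCE B (Python) =====
-- def min_flips_to_same_side(coins):
--     if not coins:
--         return 0
--
--     def trans(lo, hi):
--         # number of adjacent unequal pairs within coins[lo:hi] (hi - lo >= 1)
--         if hi - lo == 1:
--             return 0
--         mid = (lo + hi) // 2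
--         return trans(lo, mid) + trans(mid, hi) + (1 if coins[mid - 1] != coins[mid] else 0)
--
--     return trans(0, len(coins))
-- ===== Notes on version B (the rewrite author's own statement) =====
-- stated objective: alternative
-- what changed: Replaces A's single left-to-right pass with a current-side accumulator by a divide-and-conquer recursion over index ranges: transitions in a range = transitions in each half plus the boundary pair at the midpoint.
import Mathlib
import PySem

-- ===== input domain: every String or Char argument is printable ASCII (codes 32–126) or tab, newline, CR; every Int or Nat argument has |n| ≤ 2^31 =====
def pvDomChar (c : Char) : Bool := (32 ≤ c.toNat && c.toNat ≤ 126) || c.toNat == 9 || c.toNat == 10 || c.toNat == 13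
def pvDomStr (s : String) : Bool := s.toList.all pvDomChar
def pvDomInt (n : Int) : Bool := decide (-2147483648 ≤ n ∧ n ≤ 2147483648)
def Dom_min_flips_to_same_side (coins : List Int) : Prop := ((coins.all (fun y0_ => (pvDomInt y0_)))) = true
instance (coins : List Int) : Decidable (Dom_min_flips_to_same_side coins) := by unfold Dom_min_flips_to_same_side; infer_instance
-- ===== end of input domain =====

-- B computes the transition count by divide-and-conquer on index ranges (halves plus the
-- midpoint boundary pair) instead of A's single pass with a current-side accumulator; same
-- asymptotic cost, genuinely different decomposition.

-- ===== PORT A =====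
-- the for-loop over coins with state (flips, current_side)
def min_flips_to_same_side (coins : List Int) : Int :=
  match coins with
  | [] => 0
  | c0 :: _ =>
    (coins.foldl (fun (st : Int × Int) coin =>
      if coin ≠ st.2 then (st.1 + 1, coin) else st) (0, c0)).1

-- ===== PORT B =====
-- the inner 'trans(lo, hi)' of Source B; indices mid-1 and mid are always in range when it is
-- called (0 ≤ lo < hi ≤ len coins), so coins[i] is ported as getD i 0 (exact on that domain);
-- the 'hi - lo ≤ 1' guard only makes the same recursion total (Python always has hi - lo ≥ 1)
def pvTrans (coins : List Int) (lo hi : Nat) : Int :=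
  if hi - lo ≤ 1 then 0
  else
    let mid := (lo + hi) / 2
    pvTrans coins lo mid + pvTrans coins mid hi +
      (if coins.getD (mid - 1) 0 ≠ coins.getD mid 0 then 1 else 0)
termination_by hi - lo
decreasing_by all_goals omega

def min_flips_to_same_side_alt (coins : List Int) : Int :=
  if coins = [] then 0 else pvTrans coins 0 coins.length

-- ===== PRECONDITION & SPEC =====
def Spec_min_flips_to_same_side (coins : List Int) (out : Int) : Prop := out = min_flips_to_same_side_alt coins
instance (coins : List Int) (out : Int) : Decidable (Spec_min_flips_to_same_side coins out) := by unfold Spec_min_flips_to_same_side; infer_instance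

-- ===== CLAIM (what is proved, stated in full; the proofs are below) =====
def Claim_equal_min_flips_to_same_side : Prop := ∀ (coins : List Int), Dom_min_flips_to_same_side coins → Spec_min_flips_to_same_side coins (min_flips_to_same_side coins)

-- ===== LEMMAS AND PROOFS =====

-- number of adjacent unequal pairs of a list (the common value both ports compute)
def pvAdj : List Int → Int
  | [] => 0
  | [_] => 0
  | x :: y :: t => (if x ≠ y then 1 else 0) + pvAdj (y :: t)

theorem pvAdj_short (l : List Int) (h : l.length ≤ 1) : pvAdj l = 0 := by
  match l with
  | [] => rfl
  | [_] => rfl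
  | _ :: _ :: _ => simp at h

theorem pvAdj_append (u : List Int) (b : Int) (v : List Int) (a : Int)
    (h : u.getLast? = some a) :
    pvAdj (u ++ b :: v) = pvAdj u + (if a ≠ b then 1 else 0) + pvAdj (b :: v) := by
  induction u with
  | nil => simp at h
  | cons x u' ih =>
    cases u' with
    | nil =>
      simp [List.getLast?] at h
      subst h
      show (if x ≠ b then (1:Int) else 0) + pvAdj (b :: v)
        = pvAdj [x] + (if x ≠ b then 1 else 0) + pvAdj (b :: v)
      rw [show pvAdj [x] = 0 from rfl]
      ring
    | cons y u'' =>
      have h' : (y :: u'').getLast? = some a := by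
        simpa [List.getLast?_cons_cons] using h
      have key := ih h'
      show (if x ≠ y then (1:Int) else 0) + pvAdj ((y :: u'') ++ b :: v)
        = ((if x ≠ y then (1:Int) else 0) + pvAdj (y :: u'')) + (if a ≠ b then 1 else 0)
          + pvAdj (b :: v)
      rw [key]
      ring

-- A's fold, run from state (f, cur), adds the adjacent-pair count of cur :: l
theorem pv_fold_adj (l : List Int) : ∀ (f cur : Int),
    (l.foldl (fun (st : Int × Int) coin =>
      if coin ≠ st.2 then (st.1 + 1, coin) else st) (f, cur)).1
    = f + pvAdj (cur :: l) := by
  induction l with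
  | nil => intro f cur; simp [pvAdj]
  | cons x t ih =>
    intro f cur
    rw [List.foldl_cons]
    by_cases h : x = cur
    · rw [if_neg (by simp [h]), ih]
      simp [pvAdj, h]
    · rw [if_pos (by simp [h]), ih]
      rw [show pvAdj (cur :: x :: t) = (if cur ≠ x then 1 else 0) + pvAdj (x :: t) from rfl]
      rw [if_pos (fun e => h e.symm)]
      ring

-- B's recursion computes the adjacent-pair count of the segment coins[lo:hi]
theorem pv_trans_adj (coins : List Int) : ∀ (n lo hi : Nat), hi - lo ≤ n →
    lo ≤ hi → hi ≤ coins.length →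
    pvTrans coins lo hi = pvAdj ((coins.drop lo).take (hi - lo)) := by
  intro n
  induction n with
  | zero =>
    intro lo hi h1 _ _
    rw [pvTrans, if_pos (by omega)]
    rw [pvAdj_short]
    simp; omega
  | succ n ih =>
    intro lo hi h1 h2 h3
    by_cases hb : hi - lo ≤ 1
    · rw [pvTrans, if_pos hb, pvAdj_short]
      simp; omega
    · rw [pvTrans, if_neg hb]
      have hmid1 : lo < (lo + hi) / 2 := by omega
      have hmid2 : (lo + hi) / 2 < hi := by omega
      set mid := (lo + hi) / 2 with hmid
      have hlt : mid < coins.length := by omega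
      have hlt' : mid - 1 < coins.length := by omega
      -- split the segment at mid
      have hsplit : (coins.drop lo).take (hi - lo)
          = (coins.drop lo).take (mid - lo) ++ (coins.drop mid).take (hi - mid) := by
        rw [show hi - lo = (mid - lo) + (hi - mid) by omega, List.take_add, List.drop_drop,
          show lo + (mid - lo) = mid by omega]
      -- the right segment starts with coins[mid]
      have hdropmid : coins.drop mid = coins[mid] :: coins.drop (mid + 1) :=
        List.drop_eq_getElem_cons hlt
      have hright : (coins.drop mid).take (hi - mid)
          = coins[mid] :: (coins.drop (mid + 1)).take (hi - mid - 1) := by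
        rw [show hi - mid = (hi - mid - 1) + 1 by omega, hdropmid, List.take_succ_cons]
        simp
      -- the left segment ends with coins[mid-1]
      have hlast : ((coins.drop lo).take (mid - lo)).getLast? = some coins[mid - 1] := by
        have hlen : ((coins.drop lo).take (mid - lo)).length = mid - lo := by
          simp; omega
        rw [List.getLast?_eq_getElem?, hlen]
        rw [List.getElem?_take_of_lt (by omega), List.getElem?_drop]
        rw [show lo + (mid - lo - 1) = mid - 1 by omega]
        exact List.getElem?_eq_getElem hlt'
      show pvTrans coins lo mid + pvTrans coins mid hi +
          (if coins.getD (mid - 1) 0 ≠ coins.getD mid 0 then 1 else 0) = _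
      rw [hsplit, hright, pvAdj_append _ _ _ _ hlast, ← hright]
      rw [ih lo mid (by omega) (by omega) (by omega),
          ih mid hi (by omega) (by omega) h3]
      rw [List.getD_eq_getElem coins 0 hlt, List.getD_eq_getElem coins 0 hlt']
      ring

-- ===== VERDICT (by name: the statement is the Claim_ definition above) =====
theorem min_flips_to_same_side_spec : Claim_equal_min_flips_to_same_side := by
  intro coins _
  unfold Spec_min_flips_to_same_side min_flips_to_same_side min_flips_to_same_side_alt
  cases coins with
  | nil => rfl
  | cons c t =>
    rw [if_neg (by simp)]
    show (List.foldl (fun (st : Int × Int) coin =>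
        if coin ≠ st.2 then (st.1 + 1, coin) else st) (0, c) (c :: t)).1
      = pvTrans (c :: t) 0 (c :: t).length
    rw [pv_fold_adj]
    rw [pv_trans_adj (c :: t) (c :: t).length 0 (c :: t).length (by omega) (by omega) (by omega)]
    simp [pvAdj]
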